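-- pv_equiv track=rewrite | github.com/SuchitKS/adobe-hackathon-challenge-1a | Challenge_1a/extractor.py | _is_repetitive_text
-- ===== SOURCE A (Python) =====
-- def _is_repetitive_text(text):
--     words = text.lower().split()
--     if len(words) < 3:
--         return False
--     word_counts = {}
--     for word in words:
--         if len(word) > 2:
--             word_counts[word] = word_counts.get(word, 0) + 1
--     for count in word_counts.values():
--         if count > 3:
--             return True
--
--     return False
-- ===== SOURCE B (Python) =====
-- def _is_repetitive_text(text):
--     words = text.lower().split()
--     if len(words) < 3:
--         return False
--     longs = sorted(w for w in words if len(w) > 2)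
--     cur = None
--     run = 0
--     for w in longs:
--         run = run + 1 if w == cur else 1
--         cur = w
--         if run > 3:
--             return True
--     return False
-- ===== Notes on version B (the rewrite author's own statement) =====
-- stated objective: alternative
-- what changed: Replaces the hash-map frequency table and second pass over its values with a sort of the long words followed by a run-length scan that flags a consecutive run longer than 3 in the sorted list.
import Mathlib
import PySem

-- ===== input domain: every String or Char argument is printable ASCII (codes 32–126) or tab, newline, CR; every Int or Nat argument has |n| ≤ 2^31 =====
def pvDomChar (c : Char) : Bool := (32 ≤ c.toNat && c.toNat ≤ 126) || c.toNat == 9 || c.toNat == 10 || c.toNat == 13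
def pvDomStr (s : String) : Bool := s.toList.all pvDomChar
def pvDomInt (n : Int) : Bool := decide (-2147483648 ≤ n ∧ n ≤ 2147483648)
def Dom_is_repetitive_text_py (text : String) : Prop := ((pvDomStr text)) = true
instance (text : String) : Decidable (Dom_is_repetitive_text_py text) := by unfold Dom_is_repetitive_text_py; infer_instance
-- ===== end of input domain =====

-- B replaces A's frequency dictionary (build + second pass over its values) with a sort of the
-- long words followed by a run-length scan of the sorted list (alternative algorithm, not faster).

-- ===== PORT A =====
def is_repetitive_text_py (text : String) : Bool :=
  let words := PySem.Str.split₀ (PySem.Str.lower text)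
  if words.length < 3 then false
  else
    let word_counts : PySem.Dict String Int := words.foldl
      (fun d w => if PySem.Str.len w > 2 then d.insert w (d.getD w 0 + 1) else d)
      PySem.Dict.empty
    word_counts.values.any (fun count => decide (count > 3))

-- ===== PORT B =====
-- the for-loop with early return over the sorted list, as structural recursion on (list, cur, run)
def pvRunScan : List String → Option String → Nat → Bool
  | [], _, _ => false
  | w :: rest, cur, run =>
      let run' := if some w = cur then run + 1 else 1
      if run' > 3 then true else pvRunScan rest (some w) run'

def is_repetitive_text_py_alt (text : String) : Bool :=
  let words := PySem.Str.split₀ (PySem.Str.lower text)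
  if words.length < 3 then false
  else
    let longs := PySem.List.sorted (words.filter (fun w => decide (PySem.Str.len w > 2))) (fun w => w) false
    pvRunScan longs none 0

-- ===== PRECONDITION & SPEC =====
def Spec_is_repetitive_text_py (text : String) (out : Bool) : Prop := out = is_repetitive_text_py_alt text
instance (text : String) (out : Bool) : Decidable (Spec_is_repetitive_text_py text out) := by unfold Spec_is_repetitive_text_py; infer_instance

-- ===== CLAIM (what is proved, stated in full; the proofs are below) =====
def Claim_equal_is_repetitive_text_py : Prop := ∀ (text : String), Dom_is_repetitive_text_py text → Spec_is_repetitive_text_py text (is_repetitive_text_py text)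

-- ===== LEMMAS AND PROOFS =====

-- A's counting loop is the Counter of the long words.
theorem foldl_eq_counter_filter (l : List String) :
    l.foldl (fun d w => if PySem.Str.len w > 2 then d.insert w (d.getD w 0 + 1) else d)
      (PySem.Dict.empty : PySem.Dict String Int)
    = PySem.Dict.counter (l.filter (fun w => decide (PySem.Str.len w > 2))) := by
  rw [← PySem.Dict.foldl_insert_getD_add_one_eq_counter, List.foldl_filter]
  simp only [decide_eq_true_eq]

-- A's value test, expressed on the filtered list f: some element of f occurs more than 3 times in f.
theorem a_branch_eq_any_count (l : List String) :
    ((l.foldl (fun d w => if PySem.Str.len w > 2 then d.insert w (d.getD w 0 + 1) else d)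
        (PySem.Dict.empty : PySem.Dict String Int)).values.any (fun count => decide (count > 3)))
    = (l.filter (fun w => decide (PySem.Str.len w > 2))).any
        (fun w => decide (3 < List.count w (l.filter (fun w => decide (PySem.Str.len w > 2))))) := by
  rw [foldl_eq_counter_filter]
  rw [Bool.eq_iff_iff]
  simp only [PySem.Dict.values, PySem.Dict.items_counter, List.any_map, Function.comp,
    List.any_eq_true, decide_eq_true_eq, PySem.Set.mem_ofList]
  constructor
  · rintro ⟨k, hk, h3⟩; exact ⟨k, hk, by exact_mod_cast h3⟩
  · rintro ⟨w, hw, h3⟩; exact ⟨w, hw, by exact_mod_cast h3⟩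

-- head of the dropped suffix fails the predicate
theorem dropWhile_head_false (p : String → Bool) (l r' : List String) (w : String)
    (h : l.dropWhile p = w :: r') : p w = false := by
  have := List.head_dropWhile_not p (l := l) (by rw [h]; simp)
  simp only [h, List.head_cons] at this
  exact this

-- starting the scan on a fresh head is the same with cur = none or cur = the head itself (run = 0)
theorem pvRunScan_none_head (c : String) (t : List String) :
    pvRunScan (c :: t) none 0 = pvRunScan (c :: t) (some c) 0 := by
  simp [pvRunScan]

-- a head different from cur resets the scan: cur and run are irrelevant
theorem pvRunScan_skip (w c : String) (t : List String) (run : Nat) (h : w ≠ c) :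
    pvRunScan (w :: t) (some c) run = pvRunScan (w :: t) none 0 := by
  simp [pvRunScan, h]

-- scanning k copies of cur accumulates the run (no early exit needed below 4)
theorem pvRunScan_replicate (c : String) (k : Nat) (t : List String) (run : Nat) (hrun : run ≤ 3) :
    pvRunScan (List.replicate k c ++ t) (some c) run
    = if run + k > 3 then true else pvRunScan t (some c) (run + k) := by
  induction k generalizing run with
  | zero => simp [Nat.not_lt.mpr hrun]
  | succ k ih =>
    rw [List.replicate_succ, List.cons_append]
    simp only [pvRunScan, if_true]
    by_cases h4 : run + 1 > 3
    · have hk : run + (k + 1) > 3 := by omega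
      simp [h4, hk]
    · rw [if_neg h4, ih (run + 1) (by omega)]
      have h : run + 1 + k = run + (k + 1) := by omega
      rw [h]

-- run-length scan on a sorted list detects an element occurring more than 3 times
theorem pvRunScan_sorted : ∀ (n : Nat) (l : List String), l.length ≤ n →
    l.Pairwise (· ≤ ·) →
    pvRunScan l none 0 = l.any (fun w => decide (3 < List.count w l)) := by
  intro n
  induction n with
  | zero =>
    intro l hl _
    match l, hl with
    | [], _ => rfl
  | succ n ih =>
    intro l hl hsorted
    match l, hl, hsorted with
    | [], _, _ => rfl
    | c :: t, hl, hsorted =>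
      have hct : ∀ x ∈ t, c ≤ x := fun x hx => (List.pairwise_cons.mp hsorted).1 x hx
      obtain ⟨k, hk⟩ : ∃ k, k = ((c :: t).takeWhile (fun x => x == c)).length := ⟨_, rfl⟩
      obtain ⟨r, hr⟩ : ∃ r, r = (c :: t).dropWhile (fun x => x == c) := ⟨_, rfl⟩
      have hsplit : c :: t = List.replicate k c ++ r := by
        conv_lhs => rw [← List.takeWhile_append_dropWhile (p := fun x => x == c) (l := c :: t)]
        rw [← hr]
        congr 1
        rw [hk]
        apply List.eq_replicate_of_mem
        intro b hb
        simpa using List.mem_takeWhile_imp hb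
      have hkpos : 1 ≤ k := by
        rw [hk, List.takeWhile_cons, if_pos (by simp)]; simp
      have hhead_ne : ∀ w r', r = w :: r' → w ≠ c := by
        intro w r' hrr
        have := dropWhile_head_false (fun x => x == c) (c :: t) r' w (by rw [← hr, hrr])
        simpa using this
      have hrsub : r.Sublist (c :: t) := by rw [hr]; exact List.dropWhile_sublist _
      have hrp : r.Pairwise (· ≤ ·) := hsorted.sublist hrsub
      have hcr : c ∉ r := by
        intro hc
        cases hrr : r with
        | nil => rw [hrr] at hc; simp at hc
        | cons w r' =>
          have hwne : w ≠ c := hhead_ne w r' hrr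
          rw [hrr] at hc hrsub hrp
          have hwl : w ∈ c :: t := hrsub.subset (by simp)
          have hcw : c ≤ w := by
            rcases List.mem_cons.mp hwl with h | h
            · exact le_of_eq h.symm
            · exact hct _ h
          rcases List.mem_cons.mp hc with h | h
          · exact hwne h.symm
          · exact hwne (le_antisymm ((List.pairwise_cons.mp hrp).1 c h) hcw)
      have hrlen : r.length < (c :: t).length := by
        have : (c :: t).length = k + r.length := by rw [hsplit]; simp
        omega
      have hcount_c : List.count c (c :: t) = k := by
        rw [hsplit, List.count_append, List.count_replicate, if_pos (by simp),
          List.count_eq_zero_of_not_mem hcr]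
        omega
      have hcount_r : ∀ w ∈ r, List.count w (c :: t) = List.count w r := by
        intro w hw
        have hwc : w ≠ c := fun h => hcr (h ▸ hw)
        rw [hsplit, List.count_append, List.count_replicate, if_neg (by simp only [beq_iff_eq]; exact fun h => hwc h.symm), Nat.zero_add]
      have hlhs : pvRunScan (c :: t) none 0
          = if 3 < k then true else pvRunScan r (some c) k := by
        rw [pvRunScan_none_head]
        conv_lhs => rw [hsplit]
        rw [pvRunScan_replicate _ _ _ _ (by omega)]
        have hz : 0 + k = k := by omega
        rw [hz]
      have hscan_r : pvRunScan r (some c) k = pvRunScan r none 0 := by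
        cases hrr : r with
        | nil => rfl
        | cons w r' => exact pvRunScan_skip w c r' k (hhead_ne w r' hrr)
      have hih : pvRunScan r none 0 = r.any (fun w => decide (3 < List.count w r)) :=
        ih r (by simp only [List.length_cons] at hl hrlen; omega) hrp
      have hrhs : (c :: t).any (fun w => decide (3 < List.count w (c :: t)))
          = (decide (3 < k) || r.any (fun w => decide (3 < List.count w r))) := by
        rw [Bool.eq_iff_iff]
        simp only [List.any_eq_true, decide_eq_true_eq, Bool.or_eq_true]
        constructor
        · rintro ⟨w, hw, h3⟩
          by_cases hwc : w = c
          · subst hwc; left; rwa [hcount_c] at h3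
          · have hwr : w ∈ r := by
              rw [hsplit] at hw
              rcases List.mem_append.mp hw with h | h
              · exact absurd (List.eq_of_mem_replicate h) hwc
              · exact h
            exact Or.inr ⟨w, hwr, by rwa [hcount_r w hwr] at h3⟩
        · rintro (h3 | ⟨w, hw, h3⟩)
          · exact ⟨c, List.mem_cons_self, by rwa [hcount_c]⟩
          · exact ⟨w, by rw [hsplit]; exact List.mem_append_right _ hw,
              by rwa [hcount_r w hw]⟩
      rw [hlhs, hscan_r, hih, hrhs]
      by_cases h3 : 3 < k
      · simp [h3]
      · simp [h3]

-- B's else-branch equals A's, through perm-invariance of the "count > 3" test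
theorem b_branch_eq (ws : List String) :
    pvRunScan (PySem.List.sorted (ws.filter (fun w => decide (PySem.Str.len w > 2))) (fun w => w) false) none 0
    = ((ws.foldl (fun d w => if PySem.Str.len w > 2 then d.insert w (d.getD w 0 + 1) else d)
        (PySem.Dict.empty : PySem.Dict String Int)).values.any (fun count => decide (count > 3))) := by
  set f := ws.filter (fun w => decide (PySem.Str.len w > 2)) with hf
  set s := PySem.List.sorted f (fun w => w) false with hs
  have hperm : s.Perm f := PySem.List.sorted_perm f _ _
  have hpw : s.Pairwise (· ≤ ·) := PySem.List.sorted_pairwise f (fun w => w)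
  rw [a_branch_eq_any_count, ← hf,
    pvRunScan_sorted s.length s (le_refl _) hpw]
  calc s.any (fun w => decide (3 < List.count w s))
      = s.any (fun w => decide (3 < List.count w f)) := by
        exact List.any_congr rfl (fun w => by rw [hperm.count_eq])
    _ = f.any (fun w => decide (3 < List.count w f)) := hperm.any_eq

-- ===== VERDICT (by name: the statement is the Claim_ definition above) =====
theorem is_repetitive_text_py_spec : Claim_equal_is_repetitive_text_py := by
  intro text _
  unfold Spec_is_repetitive_text_py is_repetitive_text_py is_repetitive_text_py_alt
  by_cases h : (PySem.Str.split₀ (PySem.Str.lower text)).length < 3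
  · simp only [h, if_pos]
  · simp only [h, if_neg, not_false_iff]
    exact (b_branch_eq _).symm
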